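-- pv_equiv track=rewrite | github.com/bamblebam/competitive-programming | 2022/5_May_22/12-5-22/kdivisibleelementssubarray.py | countDistinct
-- ===== SOURCE A (Python) =====
-- from typing import List
--
-- def countDistinct(nums: List[int], k: int, p: int) -> int:
--     ans=set()
--     temp=list()
--     ctr=0
--     start=0
--     for num in nums:
--         if not num%p:
--             ctr+=1
--         while temp and ctr>k:
--             x=temp.pop(0)
--             if not x%p:
--                 ctr-=1
--         temp.append(num)
--         n=len(temp)
--         for i in range(n-1,-1,-1):
--             ans.add(tuple(temp[i:]))
--
--     return len(ans)
-- ===== SOURCE B (Python) =====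
-- from typing import List
--
-- def countDistinct(nums: List[int], k: int, p: int) -> int:
--     n = len(nums)
--     ans = set()
--     for r in range(1, n + 1):
--         for l in range(r):
--             sub = tuple(nums[l:r])
--             if sum(1 for x in sub if not x % p) <= k:
--                 ans.add(sub)
--     return len(ans)
-- ===== Notes on version B (the rewrite author's own statement) =====
-- stated objective: simpler
-- what changed: A's sliding window (pop-from-front with a divisibility counter, re-inserting every suffix of the window into a set each step) is replaced by a direct two-loop enumeration of all subarrays nums[l:r] that keeps exactly those with at most k elements divisible by p.
-- intended difference: On inputs with k = 0 and some element divisible by p, A counts every single-element subarray (its window always retains the current element) and so returns a larger count, e.g. A([2],0,2)=1, while B returns the intended number of distinct subarrays with at most 0 divisible elements, e.g. B([2],0,2)=0. — e.g. on countDistinct([2], 0, 2): A returns 1, B returns 0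
-- outside the precondition, e.g. on countDistinct([4], -1, 2): A returns 1, B returns 0; on countDistinct([1, 2], 0, 0): A raises ZeroDivisionError, B raises ZeroDivisionError
import Mathlib
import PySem

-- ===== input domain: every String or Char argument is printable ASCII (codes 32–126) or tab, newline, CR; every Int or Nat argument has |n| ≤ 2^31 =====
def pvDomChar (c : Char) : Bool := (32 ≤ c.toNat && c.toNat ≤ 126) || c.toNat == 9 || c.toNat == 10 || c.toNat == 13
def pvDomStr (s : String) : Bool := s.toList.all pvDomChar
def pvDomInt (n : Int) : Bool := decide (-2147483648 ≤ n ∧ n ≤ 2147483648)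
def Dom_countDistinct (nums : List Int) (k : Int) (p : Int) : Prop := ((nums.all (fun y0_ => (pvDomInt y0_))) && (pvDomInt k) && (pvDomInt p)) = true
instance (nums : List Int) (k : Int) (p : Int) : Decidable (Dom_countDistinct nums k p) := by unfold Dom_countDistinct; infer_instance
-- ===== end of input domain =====

-- B replaces A's sliding window (pop-from-front + re-adding all window suffixes into a set)
-- by a direct enumeration of all subarrays with a divisibility-count filter: simpler, same result
-- on the natural domain (0 ≤ k); on k = 0 with a divisible element present A overcounts (see D_).

-- ===== PORT A =====
-- the 'while temp and ctr>k: x=temp.pop(0); if not x%p: ctr-=1' loop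
def pvPopA (k p : Int) : List Int → Int → List Int × Int
  | [], c => ([], c)
  | x :: t, c =>
    if c > k then pvPopA k p t (if PySem.Int.mod x p = 0 then c - 1 else c)
    else (x :: t, c)

-- 'n=len(temp); for i in range(n-1,-1,-1): ans.add(tuple(temp[i:]))'
def pvAddSuffixes (ans : PySem.Set (List Int)) (temp : List Int) : PySem.Set (List Int) :=
  (PySem.List.pyRange (PySem.List.len temp - 1) (-1) (-1)).foldl
    (fun a i => PySem.Set.add a (PySem.List.slice temp (some i) none)) ans

-- one iteration of 'for num in nums'
def pvStepA (k p : Int) (st : PySem.Set (List Int) × List Int × Int) (num : Int) :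
    PySem.Set (List Int) × List Int × Int :=
  let c := if PySem.Int.mod num p = 0 then st.2.2 + 1 else st.2.2
  let tc := pvPopA k p st.2.1 c
  let temp := tc.1 ++ [num]
  (pvAddSuffixes st.1 temp, temp, tc.2)

def countDistinct (nums : List Int) (k : Int) (p : Int) : Int :=
  PySem.Set.len (nums.foldl (pvStepA k p) ((PySem.Set.empty : PySem.Set (List Int)), [], 0)).1

-- ===== PORT B =====
-- 'sum(1 for x in sub if not x % p)'
def pvCntB (p : Int) (sub : List Int) : Int :=
  sub.foldl (fun acc x => if PySem.Int.mod x p = 0 then acc + 1 else acc) 0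

def countDistinct_alt (nums : List Int) (k : Int) (p : Int) : Int :=
  let n := PySem.List.len nums
  PySem.Set.len
    ((PySem.List.pyRange 1 (n + 1) 1).foldl (fun ans r =>
        (PySem.List.pyRange 0 r 1).foldl (fun ans l =>
            let sub := PySem.List.slice nums (some l) (some r)
            if pvCntB p sub ≤ k then PySem.Set.add ans sub else ans) ans)
      (PySem.Set.empty : PySem.Set (List Int)))

-- ===== PRECONDITION & SPEC =====
-- Pre_ excludes p = 0 (both programs raise ZeroDivisionError) and negative k (a negative budget of
-- divisible elements lies outside the problem's natural domain, where A degenerates to counting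
-- the distinct single elements).
def Pre_countDistinct (nums : List Int) (k : Int) (p : Int) : Prop := p ≠ 0 ∧ 0 ≤ k
instance (nums : List Int) (k : Int) (p : Int) : Decidable (Pre_countDistinct nums k p) := by
  unfold Pre_countDistinct; infer_instance

def pvWitness_countDistinct : List Int × Int × Int := ([1, 2, 3], 1, 2)

-- On k = 0 with some element divisible by p, A counts every single-element subarray even when it
-- is divisible (its window always keeps the current element), so A overcounts; B returns the
-- intended count of distinct subarrays with at most k divisible elements.
def D_countDistinct (nums : List Int) (k : Int) (p : Int) : Prop :=
  k = 0 ∧ ∃ x ∈ nums, PySem.Int.mod x p = 0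
instance (nums : List Int) (k : Int) (p : Int) : Decidable (D_countDistinct nums k p) := by
  unfold D_countDistinct; infer_instance

def Spec_countDistinct (nums : List Int) (k : Int) (p : Int) (out : Int) : Prop :=
  ¬ D_countDistinct nums k p → out = countDistinct_alt nums k p
instance (nums : List Int) (k : Int) (p : Int) (out : Int) : Decidable (Spec_countDistinct nums k p out) := by
  unfold Spec_countDistinct; infer_instance

def pvDiffWitness_countDistinct : List Int × Int × Int := ([2], 0, 2)
def pvDiffWitnessOut_countDistinct : Int × Int := (1, 0)

-- ===== CLAIM (what is proved, stated in full; the proofs are below) =====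
def Claim_unchanged_countDistinct : Prop := ∀ (nums : List Int) (k : Int) (p : Int), Dom_countDistinct nums k p → Pre_countDistinct nums k p → Spec_countDistinct nums k p (countDistinct nums k p)
def Claim_changed_countDistinct : Prop := Dom_countDistinct (pvDiffWitness_countDistinct.1) (pvDiffWitness_countDistinct.2.1) (pvDiffWitness_countDistinct.2.2) ∧ Pre_countDistinct (pvDiffWitness_countDistinct.1) (pvDiffWitness_countDistinct.2.1) (pvDiffWitness_countDistinct.2.2) ∧ D_countDistinct (pvDiffWitness_countDistinct.1) (pvDiffWitness_countDistinct.2.1) (pvDiffWitness_countDistinct.2.2) ∧ countDistinct (pvDiffWitness_countDistinct.1) (pvDiffWitness_countDistinct.2.1) (pvDiffWitness_countDistinct.2.2) = pvDiffWitnessOut_countDistinct.1 ∧ countDistinct_alt (pvDiffWitness_countDistinct.1) (pvDiffWitness_countDistinct.2.1) (pvDiffWitness_countDistinct.2.2) = pvDiffWitnessOut_countDistinct.2 ∧ pvDiffWitnessOut_countDistinct.1 ≠ pvDiffWitnessOut_countDistinct.2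
def Claim_exact_countDistinct : Prop := ∀ (nums : List Int) (k : Int) (p : Int), Dom_countDistinct nums k p → Pre_countDistinct nums k p → D_countDistinct nums k p → countDistinct nums k p ≠ countDistinct_alt nums k p

-- ===== LEMMAS AND PROOFS =====

-- number of elements of L divisible by p (what 'ctr' tracks and what B sums)
def pvCnt (p : Int) (L : List Int) : Nat := L.countP (fun x => decide (PySem.Int.mod x p = 0))

-- invariant of A's sliding window after processing the prefix P
structure PvInvA (k p : Int) (P temp : List Int) (ctr : Int) : Prop where
  ctr_eq : ctr = (pvCnt p temp : Int)
  suff : temp <:+ P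
  ok2 : 2 ≤ temp.length → (pvCnt p temp : Int) ≤ k
  max : ∀ S, S <:+ P → (pvCnt p S : Int) ≤ k → S <:+ temp

theorem pvCnt_cons (p x : Int) (t : List Int) :
    pvCnt p (x :: t) = (if PySem.Int.mod x p = 0 then 1 else 0) + pvCnt p t := by
  simp only [pvCnt, List.countP_cons, decide_eq_true_eq]; split_ifs <;> omega

theorem pvCnt_mono {p : Int} {L T : List Int} (h : L.Sublist T) : pvCnt p L ≤ pvCnt p T :=
  h.countP_le

theorem pvPopA_spec (k p d : Int) :
    ∀ (temp : List Int) (c : Int), c = (pvCnt p temp : Int) + d →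
      (pvPopA k p temp c).2 = (pvCnt p (pvPopA k p temp c).1 : Int) + d ∧
      (pvPopA k p temp c).1 <:+ temp ∧
      ((pvPopA k p temp c).1 ≠ [] → (pvPopA k p temp c).2 ≤ k) ∧
      (∀ S, S <:+ temp → (pvCnt p S : Int) + d ≤ k → S <:+ (pvPopA k p temp c).1) := by
  intro temp
  induction temp with
  | nil =>
    intro c hc
    refine ⟨hc, List.suffix_rfl, by simp [pvPopA], ?_⟩
    intro S hS _
    simpa [pvPopA] using hS
  | cons x t ih =>
    intro c hc
    by_cases hgt : c > k
    · have hc2 : (if PySem.Int.mod x p = 0 then c - 1 else c) = (pvCnt p t : Int) + d := by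
        rw [hc, pvCnt_cons]; split_ifs <;> push_cast <;> ring
      have hrec := ih _ hc2
      have hunf : pvPopA k p (x :: t) c
          = pvPopA k p t (if PySem.Int.mod x p = 0 then c - 1 else c) := by
        simp [pvPopA, hgt]
      rw [hunf]
      refine ⟨hrec.1, hrec.2.1.trans (List.suffix_cons x t), hrec.2.2.1, ?_⟩
      intro S hS hSk
      rcases List.suffix_cons_iff.mp hS with rfl | hS'
      · exfalso
        rw [hc] at hgt
        omega
      · exact hrec.2.2.2 S hS' hSk
    · have hunf : pvPopA k p (x :: t) c = (x :: t, c) := by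
        simp [pvPopA, hgt]
      rw [hunf]
      exact ⟨hc, List.suffix_rfl, fun _ => not_lt.mp hgt, fun S hS _ => hS⟩

theorem pvAddSuffixes_mem (ans : PySem.Set (List Int)) (T : List Int) (L : List Int) :
    L ∈ pvAddSuffixes ans T ↔ L ∈ ans ∨ (L ≠ [] ∧ L <:+ T) := by
  unfold pvAddSuffixes
  rw [PySem.Set.mem_foldl_add]
  constructor
  · rintro (h | ⟨i, hi, rfl⟩)
    · exact Or.inl h
    · rw [PySem.List.mem_pyRange_neg_one] at hi
      have h0 : (0 : Int) ≤ i := by omega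
      have hlen : (i.toNat : Int) < (T.length : Int) := by
        have := hi.2
        simp only [PySem.List.len_eq] at this
        omega
      refine Or.inr ?_
      rw [PySem.List.slice_from T h0]
      constructor
      · intro hnil
        rw [List.drop_eq_nil_iff] at hnil
        omega
      · exact List.drop_suffix _ _
  · rintro (h | ⟨hne, u, hu⟩)
    · exact Or.inl h
    · refine Or.inr ⟨(u.length : Int), ?_, ?_⟩
      · rw [PySem.List.mem_pyRange_neg_one]
        have : T.length = u.length + L.length := by
          rw [← hu]; simp
        have hL : 1 ≤ L.length := List.length_pos_iff.mpr hne
        simp only [PySem.List.len_eq]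
        omega
      · rw [PySem.List.slice_from T (by positivity), Int.toNat_natCast, ← hu,
          List.drop_left]

theorem pvAddSuffixes_nodup (ans : PySem.Set (List Int)) (T : List Int)
    (h : ans.Nodup) : (pvAddSuffixes ans T).Nodup := by
  unfold pvAddSuffixes
  generalize PySem.List.pyRange (PySem.List.len T - 1) (-1) (-1) = l
  induction l generalizing ans with
  | nil => exact h
  | cons i l ih => exact ih _ (PySem.Set.nodup_add _ _ h)

theorem pv_suffix_concat_cases {S P : List Int} {x : Int} (h : S <:+ P ++ [x]) :
    S = [] ∨ ∃ S', S = S' ++ [x] ∧ S' <:+ P := by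
  rcases S.eq_nil_or_concat with rfl | ⟨S', y, rfl⟩
  · exact Or.inl rfl
  · obtain ⟨u, hu⟩ := h
    rw [List.concat_eq_append, ← List.append_assoc] at hu
    obtain ⟨h1, h2⟩ := List.append_inj' hu (by simp)
    simp only [List.cons.injEq] at h2
    exact Or.inr ⟨S', by rw [List.concat_eq_append, h2.1], ⟨u, h1⟩⟩

theorem pv_infix_concat_iff (L P : List Int) (x : Int) :
    L <:+: P ++ [x] ↔ L <:+: P ∨ L <:+ P ++ [x] := by
  constructor
  · intro h
    obtain ⟨t, hLt, ht⟩ := List.infix_iff_prefix_suffix.mp h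
    rcases pv_suffix_concat_cases ht with rfl | ⟨t', rfl, ht'⟩
    · have hL : L = [] := List.prefix_nil.mp hLt
      exact Or.inl (hL ▸ List.nil_infix)
    · rcases List.prefix_concat_iff.mp hLt with rfl | hLt'
      · refine Or.inr ?_
        obtain ⟨u, hu⟩ := ht'
        exact ⟨u, by rw [← List.append_assoc, hu]⟩
      · exact Or.inl (List.infix_iff_prefix_suffix.mpr ⟨t', hLt', ht'⟩)
  · rintro (h | h)
    · exact h.trans ((List.prefix_append P [x]).isInfix)
    · exact h.isInfix

theorem pvCnt_concat (p : Int) (t : List Int) (x : Int) :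
    pvCnt p (t ++ [x]) = pvCnt p t + (if PySem.Int.mod x p = 0 then 1 else 0) := by
  simp only [pvCnt, List.countP_append, List.countP_cons, List.countP_nil, decide_eq_true_eq]; omega

theorem pv_suffix_of_suffix_length_le {l1 l2 l3 : List Int} (h1 : l1 <:+ l3) (h2 : l2 <:+ l3)
    (h : l1.length ≤ l2.length) : l1 <:+ l2 := by
  rw [← List.reverse_prefix] at h1 h2 ⊢
  exact List.prefix_of_prefix_length_le h1 h2 (by simpa using h)

theorem pvInvA_step (k p : Int) {P temp : List Int} {ctr : Int}
    (hI : PvInvA k p P temp ctr) (num : Int) :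
    PvInvA k p (P ++ [num])
      ((pvPopA k p temp (if PySem.Int.mod num p = 0 then ctr + 1 else ctr)).1 ++ [num])
      (pvPopA k p temp (if PySem.Int.mod num p = 0 then ctr + 1 else ctr)).2 := by
  set d : Int := if PySem.Int.mod num p = 0 then 1 else 0 with hd
  have hc : (if PySem.Int.mod num p = 0 then ctr + 1 else ctr) = (pvCnt p temp : Int) + d := by
    rw [hI.ctr_eq, hd]; split_ifs <;> ring
  obtain ⟨h1, h2, h3, h4⟩ := pvPopA_spec k p d temp _ hc
  set t := (pvPopA k p temp (if PySem.Int.mod num p = 0 then ctr + 1 else ctr)).1 with ht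
  have hcnt : (pvCnt p (t ++ [num]) : Int) = (pvCnt p t : Int) + d := by
    rw [pvCnt_concat, hd]; split_ifs <;> push_cast <;> ring
  refine ⟨?_, ?_, ?_, ?_⟩
  · rw [h1, hcnt]
  · obtain ⟨u, hu⟩ := h2.trans hI.suff
    exact ⟨u, by rw [← List.append_assoc, hu]⟩
  · intro hlen
    have htne : t ≠ [] := by
      intro h0; rw [h0] at hlen; simp at hlen
    have := h3 htne
    rw [h1] at this
    rw [hcnt]
    omega
  · intro S hS hSk
    rcases pv_suffix_concat_cases hS with rfl | ⟨S', rfl, hS'⟩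
    · exact List.nil_suffix
    · have hcS : (pvCnt p (S' ++ [num]) : Int) = (pvCnt p S' : Int) + d := by
        rw [pvCnt_concat, hd]; split_ifs <;> push_cast <;> ring
    -- S' is a valid suffix of P, hence a suffix of the old window, hence survives the pops
      have hd0 : (0 : Int) ≤ d := by rw [hd]; split_ifs <;> norm_num
      have hS'temp : S' <:+ temp := hI.max S' hS' (by omega)
      have : S' <:+ t := h4 S' hS'temp (by omega)
      obtain ⟨u, hu⟩ := this
      exact ⟨u, by rw [← List.append_assoc, hu]⟩

-- nonempty suffixes of the new window = nonempty suffixes of the new prefix obeying the count bound (or singletons)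
theorem pvWindow_char (k p : Int) {P' temp' : List Int} {ctr' : Int}
    (hI : PvInvA k p P' temp' ctr') (hne : temp' ≠ []) (L : List Int) :
    (L ≠ [] ∧ L <:+ temp') ↔ (L ≠ [] ∧ L <:+ P' ∧ ((pvCnt p L : Int) ≤ k ∨ L.length = 1)) := by
  constructor
  · rintro ⟨hne', hsuf⟩
    refine ⟨hne', hsuf.trans hI.suff, ?_⟩
    by_cases h2 : 2 ≤ L.length
    · have hlen : 2 ≤ temp'.length := le_trans h2 hsuf.length_le
      have hok := hI.ok2 hlen
      have := pvCnt_mono (p := p) hsuf.sublist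
      exact Or.inl (by omega)
    · have : 1 ≤ L.length := List.length_pos_iff.mpr hne'
      exact Or.inr (by omega)
  · rintro ⟨hne', hsufP, hok | h1⟩
    · exact ⟨hne', hI.max L hsufP hok⟩
    · refine ⟨hne', pv_suffix_of_suffix_length_le hsufP hI.suff ?_⟩
      rw [h1]
      exact List.length_pos_iff.mpr hne

-- the A-side loop: window invariant, membership characterisation and nodup of the answer set
theorem pvA_loop (k p : Int) (nums : List Int) :
    PvInvA k p nums (nums.foldl (pvStepA k p) ((PySem.Set.empty : PySem.Set (List Int)), [], 0)).2.1
      (nums.foldl (pvStepA k p) ((PySem.Set.empty : PySem.Set (List Int)), [], 0)).2.2 ∧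
    (∀ L, L ∈ (nums.foldl (pvStepA k p) ((PySem.Set.empty : PySem.Set (List Int)), [], 0)).1 ↔
      (L ≠ [] ∧ L <:+: nums ∧ ((pvCnt p L : Int) ≤ k ∨ L.length = 1))) ∧
    (nums.foldl (pvStepA k p) ((PySem.Set.empty : PySem.Set (List Int)), [], 0)).1.Nodup := by
  induction nums using List.reverseRecOn with
  | nil =>
    refine ⟨⟨by simp [pvCnt], List.suffix_rfl, by intro h; simp at h, ?_⟩, ?_, ?_⟩
    · intro S hS _
      simpa using hS
    · intro L
      simp only [PySem.Set.empty]
      constructor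
      · intro h
        simp at h
      · rintro ⟨hne, hinf, _⟩
        exact absurd (List.eq_nil_of_infix_nil hinf) hne
    · simp [PySem.Set.empty]
  | append_singleton P num ih =>
    obtain ⟨hInv, hMem, hNd⟩ := ih
    rw [List.foldl_append]
    simp only [List.foldl_cons, List.foldl_nil]
    have hInv' := pvInvA_step k p hInv num
    have hne' : (pvPopA k p
        (P.foldl (pvStepA k p) ((PySem.Set.empty : PySem.Set (List Int)), [], 0)).2.1
        (if PySem.Int.mod num p = 0
          then (P.foldl (pvStepA k p) ((PySem.Set.empty : PySem.Set (List Int)), [], 0)).2.2 + 1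
          else (P.foldl (pvStepA k p) ((PySem.Set.empty : PySem.Set (List Int)), [], 0)).2.2)).1
        ++ [num] ≠ [] := by simp
    refine ⟨hInv', ?_, ?_⟩
    · intro L
      show L ∈ pvAddSuffixes _ _ ↔ _
      rw [pvAddSuffixes_mem, hMem L, pv_infix_concat_iff]
      have hwc := pvWindow_char k p hInv' hne' L
      tauto
    · exact pvAddSuffixes_nodup _ _ hNd

theorem pvCntB_eq (p : Int) (L : List Int) : pvCntB p L = (pvCnt p L : Int) := by
  suffices h : ∀ acc : Int,
      L.foldl (fun acc x => if PySem.Int.mod x p = 0 then acc + 1 else acc) acc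
        = acc + (pvCnt p L : Int) by
    simpa [pvCntB] using h 0
  induction L with
  | nil => intro acc; simp [pvCnt]
  | cons x t ih =>
    intro acc
    simp only [List.foldl_cons]
    rw [ih, pvCnt_cons]
    split_ifs <;> push_cast <;> ring

theorem pv_mem_foldl_addIf {β : Type} (g : β → List Int) (c : List Int → Prop) [DecidablePred c] :
    ∀ (l : List β) (s : PySem.Set (List Int)) (L : List Int),
      L ∈ l.foldl (fun s b => if c (g b) then PySem.Set.add s (g b) else s) s ↔
        L ∈ s ∨ ∃ b ∈ l, c (g b) ∧ L = g b := by
  intro l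
  induction l with
  | nil => intro s L; simp
  | cons b t ih =>
    intro s L
    simp only [List.foldl_cons, List.mem_cons]
    by_cases hc : c (g b)
    · rw [if_pos hc, ih, PySem.Set.mem_add]
      constructor
      · rintro ((h | rfl) | ⟨b', hb', hcb', rfl⟩)
        · exact Or.inl h
        · exact Or.inr ⟨b, Or.inl rfl, hc, rfl⟩
        · exact Or.inr ⟨b', Or.inr hb', hcb', rfl⟩
      · rintro (h | ⟨b', (rfl | hb'), hcb', rfl⟩)
        · exact Or.inl (Or.inl h)
        · exact Or.inl (Or.inr rfl)
        · exact Or.inr ⟨b', hb', hcb', rfl⟩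
    · rw [if_neg hc, ih]
      constructor
      · rintro (h | ⟨b', hb', hcb', rfl⟩)
        · exact Or.inl h
        · exact Or.inr ⟨b', Or.inr hb', hcb', rfl⟩
      · rintro (h | ⟨b', (rfl | hb'), hcb', rfl⟩)
        · exact Or.inl h
        · exact absurd hcb' hc
        · exact Or.inr ⟨b', hb', hcb', rfl⟩

theorem pv_nodup_foldl_addIf {β : Type} (g : β → List Int) (c : List Int → Prop) [DecidablePred c] :
    ∀ (l : List β) (s : PySem.Set (List Int)), s.Nodup →
      (l.foldl (fun s b => if c (g b) then PySem.Set.add s (g b) else s) s).Nodup := by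
  intro l
  induction l with
  | nil => intro s h; exact h
  | cons b t ih =>
    intro s h
    simp only [List.foldl_cons]
    by_cases hc : c (g b)
    · rw [if_pos hc]; exact ih _ (PySem.Set.nodup_add _ _ h)
    · rw [if_neg hc]; exact ih _ h

-- the B-side loops: membership characterisation and nodup of the answer set
theorem pvB_mem (nums : List Int) (k p : Int) (L : List Int) :
    L ∈ ((PySem.List.pyRange 1 (PySem.List.len nums + 1) 1).foldl (fun ans r =>
        (PySem.List.pyRange 0 r 1).foldl (fun ans l =>
            let sub := PySem.List.slice nums (some l) (some r)
            if pvCntB p sub ≤ k then PySem.Set.add ans sub else ans) ans)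
      (PySem.Set.empty : PySem.Set (List Int))) ↔
    (L ≠ [] ∧ L <:+: nums ∧ (pvCnt p L : Int) ≤ k) := by
  have hinner : ∀ (r : Int) (s : PySem.Set (List Int)) (L : List Int),
      L ∈ (PySem.List.pyRange 0 r 1).foldl (fun ans l =>
          let sub := PySem.List.slice nums (some l) (some r)
          if pvCntB p sub ≤ k then PySem.Set.add ans sub else ans) s ↔
        L ∈ s ∨ ∃ l ∈ PySem.List.pyRange 0 r 1,
          pvCntB p (PySem.List.slice nums (some l) (some r)) ≤ k ∧
            L = PySem.List.slice nums (some l) (some r) :=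
    fun r s L => pv_mem_foldl_addIf
      (fun l => PySem.List.slice nums (some l) (some r)) (fun L => pvCntB p L ≤ k) _ s L
  have houter : ∀ (rl : List Int) (s : PySem.Set (List Int)) (L : List Int),
      L ∈ rl.foldl (fun ans r =>
          (PySem.List.pyRange 0 r 1).foldl (fun ans l =>
              let sub := PySem.List.slice nums (some l) (some r)
              if pvCntB p sub ≤ k then PySem.Set.add ans sub else ans) ans) s ↔
        L ∈ s ∨ ∃ r ∈ rl, ∃ l ∈ PySem.List.pyRange 0 r 1,
          pvCntB p (PySem.List.slice nums (some l) (some r)) ≤ k ∧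
            L = PySem.List.slice nums (some l) (some r) := by
    intro rl
    induction rl with
    | nil => intro s L; simp
    | cons r t ih =>
      intro s L
      simp only [List.foldl_cons, List.mem_cons]
      rw [ih, hinner]
      constructor
      · rintro ((h | ⟨l, hl, hc, rfl⟩) | ⟨r', hr', rest⟩)
        · exact Or.inl h
        · exact Or.inr ⟨r, Or.inl rfl, l, hl, hc, rfl⟩
        · exact Or.inr ⟨r', Or.inr hr', rest⟩
      · rintro (h | ⟨r', (rfl | hr'), rest⟩)
        · exact Or.inl (Or.inl h)
        · exact Or.inl (Or.inr rest)
        · exact Or.inr ⟨r', hr', rest⟩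
  rw [houter]
  simp only [PySem.Set.empty, List.not_mem_nil, false_or]
  constructor
  · rintro ⟨r, hr, l, hl, hc, rfl⟩
    rw [PySem.List.mem_pyRange_one] at hr hl
    have h0l : (0 : Int) ≤ l := hl.1
    have h0r : (0 : Int) ≤ r := by omega
    have hrn : r.toNat ≤ nums.length := by
      have := hr.2
      simp only [PySem.List.len_eq] at this
      omega
    have hlr : l.toNat < r.toNat := by omega
    rw [PySem.List.slice_toNat nums h0l h0r] at hc ⊢
    refine ⟨?_, ?_, ?_⟩
    · apply List.length_pos_iff.mp
      rw [List.length_take, List.length_drop]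
      omega
    · exact ((List.take_prefix _ _).isInfix).trans ((List.drop_suffix _ _).isInfix)
    · rw [pvCntB_eq] at hc
      exact_mod_cast hc
  · rintro ⟨hne, hinf, hcnt⟩
    obtain ⟨s0, t0, hst⟩ := hinf
    have hlen : nums.length = s0.length + L.length + t0.length := by
      rw [← hst]; simp; omega
    have hL1 : 1 ≤ L.length := List.length_pos_iff.mpr hne
    have hsl : PySem.List.slice nums (some (s0.length : Int))
        (some ((s0.length : Int) + (L.length : Int))) = L := by
      rw [PySem.List.slice_natCast_add, ← hst, List.append_assoc, List.drop_left,
        List.take_left]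
    refine ⟨(s0.length : Int) + (L.length : Int), ?_, (s0.length : Int), ?_, ?_, ?_⟩
    · rw [PySem.List.mem_pyRange_one]
      simp only [PySem.List.len_eq]
      omega
    · rw [PySem.List.mem_pyRange_one]
      omega
    · rw [hsl, pvCntB_eq]
      exact_mod_cast hcnt
    · rw [hsl]

theorem pvB_nodup (nums : List Int) (k p : Int) :
    ((PySem.List.pyRange 1 (PySem.List.len nums + 1) 1).foldl (fun ans r =>
        (PySem.List.pyRange 0 r 1).foldl (fun ans l =>
            let sub := PySem.List.slice nums (some l) (some r)
            if pvCntB p sub ≤ k then PySem.Set.add ans sub else ans) ans)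
      (PySem.Set.empty : PySem.Set (List Int))).Nodup := by
  have hinner : ∀ (r : Int) (s : PySem.Set (List Int)), s.Nodup →
      ((PySem.List.pyRange 0 r 1).foldl (fun ans l =>
          let sub := PySem.List.slice nums (some l) (some r)
          if pvCntB p sub ≤ k then PySem.Set.add ans sub else ans) s).Nodup :=
    fun r s h => pv_nodup_foldl_addIf
      (fun l => PySem.List.slice nums (some l) (some r)) (fun L => pvCntB p L ≤ k) _ s h
  have houter : ∀ (rl : List Int) (s : PySem.Set (List Int)), s.Nodup →
      (rl.foldl (fun ans r =>
          (PySem.List.pyRange 0 r 1).foldl (fun ans l =>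
              let sub := PySem.List.slice nums (some l) (some r)
              if pvCntB p sub ≤ k then PySem.Set.add ans sub else ans) ans) s).Nodup := by
    intro rl
    induction rl with
    | nil => intro s h; exact h
    | cons r t ih =>
      intro s h
      simp only [List.foldl_cons]
      exact ih _ (hinner r s h)
  exact houter _ _ List.nodup_nil

-- ===== VERDICT (by name: the statement is the Claim_ definition above) =====
theorem countDistinct_spec : Claim_unchanged_countDistinct := by
  intro nums k p _hdom hpre hnd
  have hpre' : p ≠ 0 ∧ 0 ≤ k := hpre
  have hnd' : ¬ (k = 0 ∧ ∃ x ∈ nums, PySem.Int.mod x p = 0) := hnd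
  obtain ⟨hInv, hMemA, hNdA⟩ := pvA_loop k p nums
  have hMemB := pvB_mem nums k p
  have hNdB := pvB_nodup nums k p
  have hmem : ∀ L, L ∈ (nums.foldl (pvStepA k p)
      ((PySem.Set.empty : PySem.Set (List Int)), [], 0)).1 ↔
      L ∈ ((PySem.List.pyRange 1 (PySem.List.len nums + 1) 1).foldl (fun ans r =>
          (PySem.List.pyRange 0 r 1).foldl (fun ans l =>
              let sub := PySem.List.slice nums (some l) (some r)
              if pvCntB p sub ≤ k then PySem.Set.add ans sub else ans) ans)
        (PySem.Set.empty : PySem.Set (List Int))) := by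
    intro L
    rw [hMemA L, hMemB L]
    constructor
    · rintro ⟨hne, hinf, hok | h1⟩
      · exact ⟨hne, hinf, hok⟩
      · obtain ⟨x, rfl⟩ := List.length_eq_one_iff.mp h1
        have hxm : x ∈ nums := hinf.sublist.subset (by simp)
        refine ⟨hne, hinf, ?_⟩
        have : pvCnt p [x] = if PySem.Int.mod x p = 0 then 1 else 0 := by
          rw [show [x] = [x] ++ ([] : List Int) from rfl]
          simp [pvCnt, decide_eq_true_eq]
        rw [this]
        by_cases hdx : PySem.Int.mod x p = 0
        · have hk0 : k ≠ 0 := fun h => hnd' ⟨h, x, hxm, hdx⟩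
          rw [if_pos hdx]
          omega
        · rw [if_neg hdx]
          simpa using hpre'.2
    · rintro ⟨hne, hinf, hok⟩
      exact ⟨hne, hinf, Or.inl hok⟩
  have hperm := (List.perm_ext_iff_of_nodup hNdA hNdB).mpr hmem
  have hlen : PySem.Set.len (nums.foldl (pvStepA k p)
      ((PySem.Set.empty : PySem.Set (List Int)), [], 0)).1
      = PySem.Set.len ((PySem.List.pyRange 1 (PySem.List.len nums + 1) 1).foldl (fun ans r =>
          (PySem.List.pyRange 0 r 1).foldl (fun ans l =>
              let sub := PySem.List.slice nums (some l) (some r)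
              if pvCntB p sub ≤ k then PySem.Set.add ans sub else ans) ans)
        (PySem.Set.empty : PySem.Set (List Int))) := by
    simp only [PySem.Set.len]
    exact congrArg Int.ofNat hperm.length_eq
  exact hlen

theorem countDistinct_changed : Claim_changed_countDistinct := by
  unfold Claim_changed_countDistinct; decide

theorem countDistinct_tight : Claim_exact_countDistinct := by
  intro nums k p _hdom hpre hd
  have hpre' : p ≠ 0 ∧ 0 ≤ k := hpre
  obtain ⟨hk0, x0, hx0m, hx0d⟩ : k = 0 ∧ ∃ x ∈ nums, PySem.Int.mod x p = 0 := hd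
  obtain ⟨hInv, hMemA, hNdA⟩ := pvA_loop k p nums
  have hMemB := pvB_mem nums k p
  have hNdB := pvB_nodup nums k p
  have hcnt1 : pvCnt p [x0] = 1 := by
    simp [pvCnt, hx0d]
  have hinf0 : [x0] <:+: nums := by
    obtain ⟨s, t, hst⟩ := List.append_of_mem hx0m
    exact ⟨s, t, by rw [hst]; simp⟩
  have hx0A : [x0] ∈ (nums.foldl (pvStepA k p)
      ((PySem.Set.empty : PySem.Set (List Int)), [], 0)).1 :=
    (hMemA [x0]).mpr ⟨by simp, hinf0, Or.inr rfl⟩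
  have hx0B : [x0] ∉ ((PySem.List.pyRange 1 (PySem.List.len nums + 1) 1).foldl (fun ans r =>
          (PySem.List.pyRange 0 r 1).foldl (fun ans l =>
              let sub := PySem.List.slice nums (some l) (some r)
              if pvCntB p sub ≤ k then PySem.Set.add ans sub else ans) ans)
        (PySem.Set.empty : PySem.Set (List Int))) := by
    intro hmem
    obtain ⟨-, -, hok⟩ := (hMemB [x0]).mp hmem
    rw [hcnt1, hk0] at hok
    norm_num at hok
  have hsub : List.Subperm ((PySem.List.pyRange 1 (PySem.List.len nums + 1) 1).foldl (fun ans r =>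
          (PySem.List.pyRange 0 r 1).foldl (fun ans l =>
              let sub := PySem.List.slice nums (some l) (some r)
              if pvCntB p sub ≤ k then PySem.Set.add ans sub else ans) ans)
        (PySem.Set.empty : PySem.Set (List Int))) ((nums.foldl (pvStepA k p)
      ((PySem.Set.empty : PySem.Set (List Int)), [], 0)).1) := by
    refine hNdB.subperm ?_
    intro L hL
    obtain ⟨hne, hinf, hok⟩ := (hMemB L).mp hL
    exact (hMemA L).mpr ⟨hne, hinf, Or.inl hok⟩
  have hlt : ((PySem.List.pyRange 1 (PySem.List.len nums + 1) 1).foldl (fun ans r =>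
          (PySem.List.pyRange 0 r 1).foldl (fun ans l =>
              let sub := PySem.List.slice nums (some l) (some r)
              if pvCntB p sub ≤ k then PySem.Set.add ans sub else ans) ans)
        (PySem.Set.empty : PySem.Set (List Int))).length < (nums.foldl (pvStepA k p)
      ((PySem.Set.empty : PySem.Set (List Int)), [], 0)).1.length := by
    rcases lt_or_eq_of_le hsub.length_le with h | h
    · exact h
    · exfalso
      have hperm := hsub.perm_of_length_le (le_of_eq h.symm)
      exact hx0B (hperm.mem_iff.mpr hx0A)
  have hne : PySem.Set.len (nums.foldl (pvStepA k p)
      ((PySem.Set.empty : PySem.Set (List Int)), [], 0)).1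
      ≠ PySem.Set.len ((PySem.List.pyRange 1 (PySem.List.len nums + 1) 1).foldl (fun ans r =>
          (PySem.List.pyRange 0 r 1).foldl (fun ans l =>
              let sub := PySem.List.slice nums (some l) (some r)
              if pvCntB p sub ≤ k then PySem.Set.add ans sub else ans) ans)
        (PySem.Set.empty : PySem.Set (List Int))) := by
    simp only [PySem.Set.len]
    intro h
    rw [Int.ofNat_inj] at h
    exact absurd h (Nat.ne_of_lt' hlt)
  exact hne
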